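-- pv_equiv track=rewrite | github.com/joshuasparkes/junction-two | policy-engine/app/services/evaluation_service.py | _combine_policy_results
-- ===== SOURCE A (Python) =====
-- from typing import List, Dict, Any, Optional
--
-- def _combine_policy_results(policy_results: List[Dict[str, Any]]) -> str:
--     """
--     Combine multiple policy results into final result
--     Priority (most to least restrictive): HIDDEN > BOOKING_BLOCKED > APPROVAL_REQUIRED > OUT_OF_POLICY > IN_POLICY
--     """
--     if not policy_results:
--         return 'NOT_SPECIFIED'
--
--     result_priority = {
--         'HIDDEN': 5,
--         'BOOKING_BLOCKED': 4,
--         'APPROVAL_REQUIRED': 3,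
--         'OUT_OF_POLICY': 2,
--         'IN_POLICY': 1,
--         'NOT_SPECIFIED': 0
--     }
--
--     max_priority = 0
--     final_result = 'IN_POLICY'
--
--     for policy_result in policy_results:
--         result = policy_result.get('result', 'NOT_SPECIFIED')
--         priority = result_priority.get(result, 0)
--
--         if priority > max_priority:
--             max_priority = priority
--             final_result = result
--
--     return final_result
-- ===== SOURCE B (Python) =====
-- def _combine_policy_results(policy_results):
--     """Collect the distinct result strings into a set, then walk the severity
--     ladder from most to least restrictive and return the first level present."""
--     if not policy_results:
--         return 'NOT_SPECIFIED'
--     seen = {pr.get('result', 'NOT_SPECIFIED') for pr in policy_results}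
--     for level in ('HIDDEN', 'BOOKING_BLOCKED', 'APPROVAL_REQUIRED', 'OUT_OF_POLICY'):
--         if level in seen:
--             return level
--     return 'IN_POLICY'
-- ===== Notes on version B (the rewrite author's own statement) =====
-- stated objective: simpler
-- what changed: Instead of a single pass tracking a running (max_priority, final_result) pair via a numeric priority table, B builds a set of the distinct result strings once and then walks the fixed severity ladder HIDDEN > BOOKING_BLOCKED > APPROVAL_REQUIRED > OUT_OF_POLICY, returning the first level present (falling back to IN_POLICY); no priority numbers or running maximum at all.
import Mathlib
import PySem

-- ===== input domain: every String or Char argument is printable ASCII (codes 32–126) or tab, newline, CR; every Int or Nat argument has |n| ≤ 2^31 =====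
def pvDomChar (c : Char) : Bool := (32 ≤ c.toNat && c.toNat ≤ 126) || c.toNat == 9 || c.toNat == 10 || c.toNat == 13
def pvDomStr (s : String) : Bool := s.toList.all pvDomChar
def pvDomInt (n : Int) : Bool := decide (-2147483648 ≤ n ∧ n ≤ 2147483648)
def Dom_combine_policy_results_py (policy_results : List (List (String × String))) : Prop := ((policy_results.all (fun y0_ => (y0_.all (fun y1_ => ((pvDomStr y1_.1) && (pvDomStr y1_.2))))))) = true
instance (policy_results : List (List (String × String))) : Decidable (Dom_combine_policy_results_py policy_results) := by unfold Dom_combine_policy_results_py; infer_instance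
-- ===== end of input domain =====

-- B replaces A's running (max_priority, final_result) tracking loop by a set of the
-- distinct result strings plus a walk down the fixed severity ladder (objective: simpler).


-- ===== PORT A =====
def combine_policy_results_py (policy_results : List (List (String × String))) : String :=
  if policy_results = [] then "NOT_SPECIFIED"
  else
    let result_priority : PySem.Dict String Int := PySem.Dict.mk
      [("HIDDEN", 5), ("BOOKING_BLOCKED", 4), ("APPROVAL_REQUIRED", 3),
       ("OUT_OF_POLICY", 2), ("IN_POLICY", 1), ("NOT_SPECIFIED", 0)]
    let st := policy_results.foldl (fun (st : Int × String) policy_result =>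
      let result := (PySem.Dict.mk policy_result).getD "result" "NOT_SPECIFIED"
      let priority := result_priority.getD result 0
      if priority > st.1 then (priority, result) else st) ((0 : Int), "IN_POLICY")
    st.2

-- ===== PORT B =====
def combine_policy_results_py_alt (policy_results : List (List (String × String))) : String :=
  match policy_results with
  | [] => "NOT_SPECIFIED"
  | _ :: _ =>
    -- seen = {pr.get('result', 'NOT_SPECIFIED') for pr in policy_results}
    let seen : PySem.Set String := PySem.Set.ofList
      (policy_results.map (fun pr => (PySem.Dict.mk pr).getD "result" "NOT_SPECIFIED"))
    -- for level in (…): if level in seen: return level  — unrolled over the 4-tuple literal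
    if PySem.Set.contains seen "HIDDEN" then "HIDDEN"
    else if PySem.Set.contains seen "BOOKING_BLOCKED" then "BOOKING_BLOCKED"
    else if PySem.Set.contains seen "APPROVAL_REQUIRED" then "APPROVAL_REQUIRED"
    else if PySem.Set.contains seen "OUT_OF_POLICY" then "OUT_OF_POLICY"
    else "IN_POLICY"

-- ===== PRECONDITION & SPEC =====
def Spec_combine_policy_results_py (policy_results : List (List (String × String))) (out : String) : Prop := out = combine_policy_results_py_alt policy_results
instance (policy_results : List (List (String × String))) (out : String) : Decidable (Spec_combine_policy_results_py policy_results out) := by unfold Spec_combine_policy_results_py; infer_instance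

-- ===== CLAIM (what is proved, stated in full; the proofs are below) =====
def Claim_equal_combine_policy_results_py : Prop := ∀ (policy_results : List (List (String × String))), Dom_combine_policy_results_py policy_results → Spec_combine_policy_results_py policy_results (combine_policy_results_py policy_results)

-- ===== LEMMAS AND PROOFS =====

def pvResDict : PySem.Dict String Int := PySem.Dict.mk
  [("HIDDEN", 5), ("BOOKING_BLOCKED", 4), ("APPROVAL_REQUIRED", 3),
   ("OUT_OF_POLICY", 2), ("IN_POLICY", 1), ("NOT_SPECIFIED", 0)]

def pvRes (pr : List (String × String)) : String :=
  (PySem.Dict.mk pr).getD "result" "NOT_SPECIFIED"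

def pvP (pr : List (String × String)) : Int := pvResDict.getD (pvRes pr) 0

theorem pvGetD_else (s : String) (h1 : s ≠ "HIDDEN") (h2 : s ≠ "BOOKING_BLOCKED")
    (h3 : s ≠ "APPROVAL_REQUIRED") (h4 : s ≠ "OUT_OF_POLICY") (h5 : s ≠ "IN_POLICY")
    (h6 : s ≠ "NOT_SPECIFIED") : pvResDict.getD s 0 = 0 := by
  simp [pvResDict, PySem.Dict.getD, PySem.Dict.get?, beq_iff_eq,
    Ne.symm h1, Ne.symm h2, Ne.symm h3, Ne.symm h4, Ne.symm h5, Ne.symm h6]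

theorem pvP_bounds (s : String) : 0 ≤ pvResDict.getD s 0 ∧ pvResDict.getD s 0 ≤ 5 := by
  by_cases h1 : s = "HIDDEN"; · subst h1; decide
  by_cases h2 : s = "BOOKING_BLOCKED"; · subst h2; decide
  by_cases h3 : s = "APPROVAL_REQUIRED"; · subst h3; decide
  by_cases h4 : s = "OUT_OF_POLICY"; · subst h4; decide
  by_cases h5 : s = "IN_POLICY"; · subst h5; decide
  by_cases h6 : s = "NOT_SPECIFIED"; · subst h6; decide
  rw [pvGetD_else s h1 h2 h3 h4 h5 h6]; norm_num

-- each priority 2..5 is taken by exactly one result string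
theorem pvP_eq_iff (s : String) :
    (pvResDict.getD s 0 = 5 ↔ s = "HIDDEN") ∧
    (pvResDict.getD s 0 = 4 ↔ s = "BOOKING_BLOCKED") ∧
    (pvResDict.getD s 0 = 3 ↔ s = "APPROVAL_REQUIRED") ∧
    (pvResDict.getD s 0 = 2 ↔ s = "OUT_OF_POLICY") := by
  by_cases h1 : s = "HIDDEN"; · subst h1; decide
  by_cases h2 : s = "BOOKING_BLOCKED"; · subst h2; decide
  by_cases h3 : s = "APPROVAL_REQUIRED"; · subst h3; decide
  by_cases h4 : s = "OUT_OF_POLICY"; · subst h4; decide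
  by_cases h5 : s = "IN_POLICY"; · subst h5; decide
  by_cases h6 : s = "NOT_SPECIFIED"; · subst h6; decide
  rw [pvGetD_else s h1 h2 h3 h4 h5 h6]
  refine ⟨⟨fun h => absurd h (by norm_num), fun h => absurd h h1⟩,
          ⟨fun h => absurd h (by norm_num), fun h => absurd h h2⟩,
          ⟨fun h => absurd h (by norm_num), fun h => absurd h h3⟩,
          ⟨fun h => absurd h (by norm_num), fun h => absurd h h4⟩⟩

-- characterisation of A's fold: result is pvRev of the max priority
def pvRev (m : Int) : String :=
  if m = 5 then "HIDDEN" else if m = 4 then "BOOKING_BLOCKED"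
  else if m = 3 then "APPROVAL_REQUIRED" else if m = 2 then "OUT_OF_POLICY"
  else "IN_POLICY"

theorem pvCanon (s : String) (h : 0 < pvResDict.getD s 0) :
    pvRev (pvResDict.getD s 0) = s := by
  by_cases h1 : s = "HIDDEN"; · subst h1; decide
  by_cases h2 : s = "BOOKING_BLOCKED"; · subst h2; decide
  by_cases h3 : s = "APPROVAL_REQUIRED"; · subst h3; decide
  by_cases h4 : s = "OUT_OF_POLICY"; · subst h4; decide
  by_cases h5 : s = "IN_POLICY"; · subst h5; decide
  by_cases h6 : s = "NOT_SPECIFIED"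
  · subst h6; exact absurd h (by decide)
  · rw [pvGetD_else s h1 h2 h3 h4 h5 h6] at h; exact absurd h (by norm_num)

theorem pvInv (l : List (List (String × String))) (m : Int) (h0 : 0 ≤ m) :
    (l.foldl (fun (st : Int × String) pr =>
        if pvP pr > st.1 then (pvP pr, pvRes pr) else st) (m, pvRev m)).2
      = pvRev (l.foldl (fun acc pr => max acc (pvP pr)) m) := by
  induction l generalizing m with
  | nil => rfl
  | cons d t ih =>
    simp only [List.foldl]
    by_cases hgt : pvP d > m
    · rw [if_pos hgt, max_eq_right (le_of_lt hgt)]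
      have hc : pvRev (pvP d) = pvRes d := pvCanon _ (lt_of_le_of_lt h0 hgt)
      rw [← hc]
      exact ih (pvP d) (le_of_lt (lt_of_le_of_lt h0 hgt))
    · rw [if_neg hgt, max_eq_left (le_of_not_gt hgt)]
      exact ih m h0

-- the fold max is a bound attained by some element (or the start value)
theorem pvFoldMax (l : List (List (String × String))) (m : Int) :
    m ≤ l.foldl (fun acc pr => max acc (pvP pr)) m ∧
    (l.foldl (fun acc pr => max acc (pvP pr)) m = m ∨
      ∃ pr ∈ l, l.foldl (fun acc pr => max acc (pvP pr)) m = pvP pr) ∧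
    (∀ pr ∈ l, pvP pr ≤ l.foldl (fun acc pr => max acc (pvP pr)) m) := by
  induction l generalizing m with
  | nil => exact ⟨le_rfl, Or.inl rfl, by simp⟩
  | cons d t ih =>
    obtain ⟨hle, hatt, hub⟩ := ih (max m (pvP d))
    simp only [List.foldl]
    refine ⟨le_trans (le_max_left _ _) hle, ?_, ?_⟩
    · rcases hatt with h | ⟨pr, hpr, hE⟩
      · rcases max_cases m (pvP d) with ⟨he, _⟩ | ⟨he, _⟩
        · exact Or.inl (h.trans he)
        · exact Or.inr ⟨d, List.mem_cons_self, h.trans he⟩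
      · exact Or.inr ⟨pr, List.mem_cons_of_mem _ hpr, hE⟩
    · intro pr hpr
      rcases List.mem_cons.mp hpr with h | h
      · subst h; exact le_trans (le_max_right _ _) hle
      · exact hub pr h

theorem pvMem_iff (l : List (List (String × String))) (s : String) :
    s ∈ l.map pvRes ↔ ∃ pr ∈ l, pvRes pr = s := by
  simp [List.mem_map, eq_comm]

-- ===== VERDICT (by name: the statement is the Claim_ definition above) =====
theorem combine_policy_results_py_spec : Claim_equal_combine_policy_results_py := by
  intro prs _
  unfold Spec_combine_policy_results_py combine_policy_results_py combine_policy_results_py_alt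
  match prs with
  | [] => rfl
  | h :: t =>
    simp only [reduceCtorEq, if_false]
    set l := h :: t with hl
    -- A's side: fold equals pvRev of the max priority
    set F := l.foldl (fun acc pr => max acc (pvP pr)) 0 with hF
    have hA : (l.foldl (fun (st : Int × String) pr =>
        if pvP pr > st.1 then (pvP pr, pvRes pr) else st) ((0 : Int), "IN_POLICY")).2
        = pvRev F := by
      have : ((0 : Int), "IN_POLICY") = ((0 : Int), pvRev 0) := by decide
      rw [this]; exact pvInv l 0 le_rfl
    show (l.foldl (fun (st : Int × String) pr =>
        if pvP pr > st.1 then (pvP pr, pvRes pr) else st) ((0 : Int), "IN_POLICY")).2 = _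
    rw [hA]
    -- B's side: membership in the set of results
    obtain ⟨hle0, hatt, hub⟩ := pvFoldMax l 0
    rw [← hF] at hle0 hatt hub
    have hF5 : F ≤ 5 := by
      rcases hatt with h | ⟨pr, _, hE⟩
      · omega
      · rw [hE]; exact (pvP_bounds (pvRes pr)).2
    have hmem : ∀ s : String, (PySem.Set.contains
        (PySem.Set.ofList (l.map (fun pr => (PySem.Dict.mk pr).getD "result" "NOT_SPECIFIED"))) s
        = true) ↔ ∃ pr ∈ l, pvRes pr = s := by
      intro s
      rw [PySem.Set.contains_iff, PySem.Set.mem_ofList]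
      exact pvMem_iff l s
    have hkk : ∀ (k : Int) (s : String), (∀ t, pvResDict.getD t 0 = k ↔ t = s) →
        ((∃ pr ∈ l, pvP pr = k) ↔ ∃ pr ∈ l, pvRes pr = s) := by
      intro k s hks
      constructor
      · rintro ⟨pr, hpr, hE⟩; exact ⟨pr, hpr, (hks (pvRes pr)).mp hE⟩
      · rintro ⟨pr, hpr, hE⟩; exact ⟨pr, hpr, (hks (pvRes pr)).mpr hE⟩
    have h5 := hkk 5 "HIDDEN" (fun t => (pvP_eq_iff t).1)
    have h4 := hkk 4 "BOOKING_BLOCKED" (fun t => (pvP_eq_iff t).2.1)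
    have h3 := hkk 3 "APPROVAL_REQUIRED" (fun t => (pvP_eq_iff t).2.2.1)
    have h2 := hkk 2 "OUT_OF_POLICY" (fun t => (pvP_eq_iff t).2.2.2)
    -- if F is at least 2 it is attained by some element
    have hattF : F ≠ 0 → ∃ pr ∈ l, pvP pr = F := by
      intro hne
      rcases hatt with h | h
      · exact absurd h hne
      · obtain ⟨pr, hpr, hE⟩ := h; exact ⟨pr, hpr, hE.symm⟩
    split_ifs with c5 c4 c3 c2
    · obtain ⟨pr, hpr, hE⟩ := h5.mpr ((hmem _).mp c5)
      have : (5 : Int) ≤ F := hE ▸ hub pr hpr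
      have : F = 5 := by omega
      simp [pvRev, this]
    · obtain ⟨pr, hpr, hE⟩ := h4.mpr ((hmem _).mp c4)
      have hge : (4 : Int) ≤ F := hE ▸ hub pr hpr
      have hne5 : F ≠ 5 := by
        intro h'
        obtain ⟨pr', hpr', hE'⟩ := hattF (by omega)
        exact c5 ((hmem _).mpr (h5.mp ⟨pr', hpr', h' ▸ hE'⟩))
      have : F = 4 := by omega
      simp [pvRev, this]
    · obtain ⟨pr, hpr, hE⟩ := h3.mpr ((hmem _).mp c3)
      have hge : (3 : Int) ≤ F := hE ▸ hub pr hpr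
      have hne5 : F ≠ 5 := by
        intro h'
        obtain ⟨pr', hpr', hE'⟩ := hattF (by omega)
        exact c5 ((hmem _).mpr (h5.mp ⟨pr', hpr', h' ▸ hE'⟩))
      have hne4 : F ≠ 4 := by
        intro h'
        obtain ⟨pr', hpr', hE'⟩ := hattF (by omega)
        exact c4 ((hmem _).mpr (h4.mp ⟨pr', hpr', h' ▸ hE'⟩))
      have : F = 3 := by omega
      simp [pvRev, this]
    · obtain ⟨pr, hpr, hE⟩ := h2.mpr ((hmem _).mp c2)
      have hge : (2 : Int) ≤ F := hE ▸ hub pr hpr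
      have hne5 : F ≠ 5 := by
        intro h'
        obtain ⟨pr', hpr', hE'⟩ := hattF (by omega)
        exact c5 ((hmem _).mpr (h5.mp ⟨pr', hpr', h' ▸ hE'⟩))
      have hne4 : F ≠ 4 := by
        intro h'
        obtain ⟨pr', hpr', hE'⟩ := hattF (by omega)
        exact c4 ((hmem _).mpr (h4.mp ⟨pr', hpr', h' ▸ hE'⟩))
      have hne3 : F ≠ 3 := by
        intro h'
        obtain ⟨pr', hpr', hE'⟩ := hattF (by omega)
        exact c3 ((hmem _).mpr (h3.mp ⟨pr', hpr', h' ▸ hE'⟩))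
      have : F = 2 := by omega
      simp [pvRev, this]
    · have hle1 : F ≤ 1 := by
        by_contra hgt
        obtain ⟨pr', hpr', hE'⟩ := hattF (by omega)
        interval_cases F
        · exact c2 ((hmem _).mpr (h2.mp ⟨pr', hpr', hE'⟩))
        · exact c3 ((hmem _).mpr (h3.mp ⟨pr', hpr', hE'⟩))
        · exact c4 ((hmem _).mpr (h4.mp ⟨pr', hpr', hE'⟩))
        · exact c5 ((hmem _).mpr (h5.mp ⟨pr', hpr', hE'⟩))
      have : pvRev F = "IN_POLICY" := by
        unfold pvRev
        rw [if_neg (by omega), if_neg (by omega), if_neg (by omega), if_neg (by omega)]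
      exact this
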